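-- pv_equiv track=rewrite | github.com/jaredc-s/structure_and_landscapes | bitstring/nk_model.py | _consecutive_dependency_lists
-- ===== SOURCE A (Python) =====
-- import collections
-- import itertools
--
-- def _consecutive_dependency_lists(n, k):
--     """
--     Returns a depandancy list for a given n and k, where dependencies
--     are consecutive.
--     """
--     assert(k < n)
--     loci = collections.deque(range(n))
--     deps = []
--     for _ in range(n):
--         deps.append(list(itertools.islice(loci, 0, k + 1)))
--         loci.rotate(-1)
--     return deps
-- ===== SOURCE B (Python) =====
-- def _consecutive_dependency_lists(n, k):
--     """
--     Returns a dependency list for a given n and k, where dependencies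
--     are consecutive.
--     """
--     assert(k < n)
--     return [[(i + j) % n for j in range(k + 1)] for i in range(n)]
-- ===== Notes on version B (the rewrite author's own statement) =====
-- stated objective: simpler
-- what changed: Replaces the deque rotate-and-islice loop with a closed-form double comprehension computing each row's indices as (i+j) % n.
import Mathlib
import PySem

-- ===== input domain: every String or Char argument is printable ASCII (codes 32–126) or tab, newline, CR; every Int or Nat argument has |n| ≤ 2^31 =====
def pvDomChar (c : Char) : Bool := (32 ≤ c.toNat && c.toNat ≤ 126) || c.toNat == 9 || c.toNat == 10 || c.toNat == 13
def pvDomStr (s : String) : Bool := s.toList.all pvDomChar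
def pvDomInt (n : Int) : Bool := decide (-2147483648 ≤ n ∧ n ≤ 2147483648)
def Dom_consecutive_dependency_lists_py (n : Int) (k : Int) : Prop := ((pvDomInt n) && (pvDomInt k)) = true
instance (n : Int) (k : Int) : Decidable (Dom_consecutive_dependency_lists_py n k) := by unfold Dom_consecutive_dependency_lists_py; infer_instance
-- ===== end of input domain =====

-- B replaces A's deque rotate-and-slice loop with a closed-form double comprehension (i+j) % n; objective: simpler.

-- ===== PORT A =====
-- deque(range(n)) is a List Int; deque.rotate(-1) is drop 1 ++ take 1; islice(loci, 0, k+1)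
-- is take (k+1).toNat — exact on Pre_ (islice raises ValueError for negative stop, excluded there).
def consecutive_dependency_lists_py (n : Int) (k : Int) : List (List Int) :=
  ((List.range n.toNat).foldl
    (fun (st : List Int × List (List Int)) _ =>
      (st.1.drop 1 ++ st.1.take 1, st.2 ++ [st.1.take (k + 1).toNat]))
    (PySem.List.pyRange 0 n 1, [])).2

-- ===== PORT B =====
def consecutive_dependency_lists_py_alt (n : Int) (k : Int) : List (List Int) :=
  (List.range n.toNat).map (fun (i : Nat) =>
    (List.range (k + 1).toNat).map (fun (j : Nat) => PySem.Int.mod ((i : Int) + (j : Int)) n))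

-- ===== PRECONDITION & SPEC =====
-- Pre_ excludes exactly where the Python A raises: k ≥ n fails the assert (AssertionError);
-- n > 0 with k ≤ -2 makes islice's stop k+1 negative (ValueError).
def Pre_consecutive_dependency_lists_py (n : Int) (k : Int) : Prop :=
  k < n ∧ (n ≤ 0 ∨ -1 ≤ k)
instance (n : Int) (k : Int) : Decidable (Pre_consecutive_dependency_lists_py n k) := by
  unfold Pre_consecutive_dependency_lists_py; infer_instance
def pvWitness_consecutive_dependency_lists_py : Int × Int := (5, 2)

def Spec_consecutive_dependency_lists_py (n : Int) (k : Int) (out : List (List Int)) : Prop :=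
  out = consecutive_dependency_lists_py_alt n k
instance (n : Int) (k : Int) (out : List (List Int)) : Decidable (Spec_consecutive_dependency_lists_py n k out) := by
  unfold Spec_consecutive_dependency_lists_py; infer_instance

-- ===== CLAIM (what is proved, stated in full; the proofs are below) =====
def Claim_equal_consecutive_dependency_lists_py : Prop :=
  ∀ (n : Int) (k : Int), Dom_consecutive_dependency_lists_py n k →
    Pre_consecutive_dependency_lists_py n k →
    Spec_consecutive_dependency_lists_py n k (consecutive_dependency_lists_py n k)
-- ===== LEMMAS AND PROOFS =====

-- one rotation step of A's deque is List.rotate by 1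
theorem drop_append_take_eq_rotate (l : List Int) : l.drop 1 ++ l.take 1 = l.rotate 1 := by
  cases l with
  | nil => simp
  | cons a t => simp [List.rotate_cons_succ]

-- A's foldl, unrolled: after c steps the deque is rotated c times and the accumulator holds the c rows
theorem foldA_unroll (K : Nat) (l : List Int) (acc : List (List Int)) (c : Nat) :
    (List.range c).foldl
      (fun (st : List Int × List (List Int)) _ =>
        (st.1.drop 1 ++ st.1.take 1, st.2 ++ [st.1.take K])) (l, acc)
    = (l.rotate c, acc ++ (List.range c).map (fun m => (l.rotate m).take K)) := by
  induction c with
  | zero => simp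
  | succ c ih =>
      rw [List.range_succ, List.foldl_append, ih]
      simp only [List.foldl_cons, List.foldl_nil]
      rw [drop_append_take_eq_rotate, List.rotate_rotate]
      simp

-- a row of A equals the corresponding row of B
theorem row_eq (n k : Int) (hn : 0 < n) (hk : k < n) (m : Nat) (hm : m < n.toNat) :
    ((PySem.List.pyRange 0 n 1).rotate m).take (k + 1).toNat
      = (List.range (k + 1).toNat).map (fun (j : Nat) => PySem.Int.mod ((m : Int) + (j : Int)) n) := by
  have hKN : (k + 1).toNat ≤ n.toNat := by omega
  have hlen : (PySem.List.pyRange 0 n 1).length = n.toNat := by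
    simp [PySem.List.length_pyRange_one]
  apply List.ext_getElem
  · simp [hlen]; omega
  · intro j h1 h2
    have hj : j < (k + 1).toNat := by simpa [hlen] using h2
    have hjn : j < ((PySem.List.pyRange 0 n 1).rotate m).length := by
      simp [hlen]; omega
    rw [List.getElem_take, List.getElem_map, List.getElem_range]
    rw [List.getElem_rotate]
    have hidx : (j + m) % (PySem.List.pyRange 0 n 1).length < n.toNat := by
      rw [hlen]; exact Nat.mod_lt _ (by omega)
    rw [PySem.List.getElem_pyRange_one]
    have hmod : PySem.Int.mod ((m : Int) + (j : Int)) n = (((j + m) % n.toNat : Nat) : Int) := by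
      rw [PySem.Int.mod_eq_emod_of_pos hn]
      have : ((m : Int) + (j : Int)) = (((j + m : Nat) : Int)) := by push_cast; ring
      rw [this]
      have hn' : (n : Int) = ((n.toNat : Nat) : Int) := by omega
      rw [hn']
      exact_mod_cast rfl
    rw [hmod, hlen]
    push_cast
    ring

-- ===== VERDICT (by name: the statement is the Claim_ definition above) =====
theorem consecutive_dependency_lists_py_spec : Claim_equal_consecutive_dependency_lists_py := by
  intro n k _ hpre
  obtain ⟨hk, hcase⟩ := hpre
  unfold Spec_consecutive_dependency_lists_py consecutive_dependency_lists_py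
    consecutive_dependency_lists_py_alt
  rw [foldA_unroll]
  simp only [List.nil_append, List.map_eq_map_iff, List.mem_range]
  rcases hcase with hn0 | hk1
  · have : n.toNat = 0 := by omega
    simp [this]
  · by_cases hn : 0 < n
    · intro m hm
      exact row_eq n k hn hk m hm
    · have : n.toNat = 0 := by omega
      simp [this]
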